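-- pv_equiv track=rewrite | github.com/xtudbxk/practice | python/horse_races.py | get_max_golds
-- ===== SOURCE A (Python) =====
-- def get_gold_by_one_race(horse_tian,horse_qi):
--     return 1 if horse_tian > horse_qi else (-1 if horse_tian < horse_qi else 0)
--
-- def get_max_golds(horses_tian,horses_qi):
--     horses_tian.sort(reverse=True)
--     horses_qi.sort(reverse=True)
--
--     max_golds = []
--     # initailization, only one race
--     max_golds.append([])
--     max_golds[-1].append(get_gold_by_one_race(horses_tian[0],horses_qi[0])) # not use slow horse
--     max_golds[-1].append(get_gold_by_one_race(horses_tian[-1],horses_qi[0])) # use slow horse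
--
--     # dp
--     for race_num in range(2,len(horses_tian)+1):
--         max_golds.append([])
--         # slow_horse_num = 0
--         max_golds[-1].append(max_golds[-2][0]+get_gold_by_one_race(horses_tian[race_num-1],horses_qi[race_num-1]))
--         # 0 < slow_horse_num < race_num
--         for slow_horse_num in range(1,race_num):
--             max_golds[-1].append(
--                 max(max_golds[-2][slow_horse_num]+get_gold_by_one_race(horses_tian[race_num-slow_horse_num-1],horses_qi[race_num-1]),
--                     max_golds[-2][slow_horse_num-1]+get_gold_by_one_race(horses_tian[-slow_horse_num],horses_qi[race_num-1])))
--         # slow_horse_num = race_num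
--         max_golds[-1].append(max_golds[-2][race_num-1]+get_gold_by_one_race(horses_tian[-race_num],horses_qi[race_num-1])) # slow_horse_num = race_num
--
--     return max(max_golds[-1])
-- ===== SOURCE B (Python) =====
-- def get_max_golds(horses_tian, horses_qi):
--     # Backward (suffix) DP over a single rolling 1-D array; returns g[0] directly
--     # (no final max). Does not mutate its arguments (A sorts them in place).
--     t = sorted(horses_tian, reverse=True)
--     q = sorted(horses_qi, reverse=True)
--     n = len(t)
--     g = [0] * (n + 1)  # level k = n: no races left
--     for k in range(n - 1, -1, -1):
--         # g[f] becomes the best net result of races k..n-1 when f fast and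
--         # k-f slow horses of Tian are already committed.
--         for f in range(k + 1):
--             s = k - f
--             fast = 1 if t[f] > q[k] else (-1 if t[f] < q[k] else 0)
--             slow = 1 if t[n - 1 - s] > q[k] else (-1 if t[n - 1 - s] < q[k] else 0)
--             g[f] = max(fast + g[f + 1], slow + g[f])
--     return g[0]
-- ===== Notes on version B (the rewrite author's own statement) =====
-- stated objective: alternative
-- what changed: A fills a forward DP table row by row (a list of lists, one row per race, with negative-index bookkeeping) and takes a final max over the last row; B runs the DP backward as a suffix-optimum on a single rolling 1-D array updated in place, whose entry 0 is the answer directly with no final max (B also does not mutate its arguments, while A sorts both lists in place).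
import Mathlib
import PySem

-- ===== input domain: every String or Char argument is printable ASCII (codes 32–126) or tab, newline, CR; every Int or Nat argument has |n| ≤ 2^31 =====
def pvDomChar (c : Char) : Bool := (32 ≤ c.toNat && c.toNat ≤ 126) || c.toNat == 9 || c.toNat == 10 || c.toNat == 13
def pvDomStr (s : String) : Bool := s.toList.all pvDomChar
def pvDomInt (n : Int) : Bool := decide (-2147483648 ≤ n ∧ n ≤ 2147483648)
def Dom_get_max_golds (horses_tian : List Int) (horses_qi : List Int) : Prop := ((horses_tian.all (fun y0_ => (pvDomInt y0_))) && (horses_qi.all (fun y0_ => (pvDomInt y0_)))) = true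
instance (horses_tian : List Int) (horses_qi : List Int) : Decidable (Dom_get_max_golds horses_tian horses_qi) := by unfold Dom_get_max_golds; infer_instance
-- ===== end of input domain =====

-- B replaces A's forward row-table DP (all rows kept, final max over the last row) by a backward
-- suffix DP on one rolling 1-D array whose entry 0 is the answer directly; objective: alternative
-- (same O(n^2) cost, different direction/state). NOTE: A sorts BOTH argument lists in place; B does
-- not mutate its arguments — the equivalence proved here is about the return value only.

-- ===== PORT A =====
def get_gold_by_one_race (horse_tian : Int) (horse_qi : Int) : Int :=
  if horse_tian > horse_qi then 1 else if horse_tian < horse_qi then -1 else 0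

-- pyGetD's default value is never reached on inputs satisfying Pre_get_max_golds
-- (every index Python A uses is then in range; out of Pre_ Python A raises IndexError).
-- outer loop body of A (one race_num iteration); tbl is Python's max_golds
def aRow (t : List Int) (q : List Int) (tbl : List (List Int)) (race_num : Int) : List (List Int) :=
  let prev := PySem.List.pyGetD tbl (-1) []
  let r0 : List Int :=
    [PySem.List.pyGetD prev 0 0 +
       get_gold_by_one_race (PySem.List.pyGetD t (race_num - 1) 0) (PySem.List.pyGetD q (race_num - 1) 0)]
  let rmid := (PySem.List.pyRange 1 race_num 1).foldl (fun row slow_horse_num =>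
    row ++ [max
      (PySem.List.pyGetD prev slow_horse_num 0 +
         get_gold_by_one_race (PySem.List.pyGetD t (race_num - slow_horse_num - 1) 0) (PySem.List.pyGetD q (race_num - 1) 0))
      (PySem.List.pyGetD prev (slow_horse_num - 1) 0 +
         get_gold_by_one_race (PySem.List.pyGetD t (-slow_horse_num) 0) (PySem.List.pyGetD q (race_num - 1) 0))]) r0
  let rfull := rmid ++
    [PySem.List.pyGetD prev (race_num - 1) 0 +
       get_gold_by_one_race (PySem.List.pyGetD t (-race_num) 0) (PySem.List.pyGetD q (race_num - 1) 0)]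
  tbl ++ [rfull]

def get_max_golds (horses_tian : List Int) (horses_qi : List Int) : Int :=
  let t := PySem.List.sorted horses_tian (fun x => x) true
  let q := PySem.List.sorted horses_qi (fun x => x) true
  let row0 : List Int :=
    [get_gold_by_one_race (PySem.List.pyGetD t 0 0) (PySem.List.pyGetD q 0 0),
     get_gold_by_one_race (PySem.List.pyGetD t (-1) 0) (PySem.List.pyGetD q 0 0)]
  let table := (PySem.List.pyRange 2 (PySem.List.len t + 1) 1).foldl (aRow t q) [row0]
  (PySem.List.max? (PySem.List.pyGetD table (-1) []) (fun y => y)).getD 0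

-- ===== PORT B =====
-- inner loop body of B (one f iteration at level k)
def bInnerStep (t : List Int) (q : List Int) (k : Int) (g : List Int) (f : Int) : List Int :=
  let n : Int := PySem.List.len t
  let s := k - f
  let fast : Int := if PySem.List.pyGetD t f 0 > PySem.List.pyGetD q k 0 then 1
    else if PySem.List.pyGetD t f 0 < PySem.List.pyGetD q k 0 then -1 else 0
  let slow : Int := if PySem.List.pyGetD t (n - 1 - s) 0 > PySem.List.pyGetD q k 0 then 1
    else if PySem.List.pyGetD t (n - 1 - s) 0 < PySem.List.pyGetD q k 0 then -1 else 0
  PySem.List.pySetD g f (max (fast + PySem.List.pyGetD g (f + 1) 0) (slow + PySem.List.pyGetD g f 0))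

-- outer loop body of B (one level k)
def bLevel (t : List Int) (q : List Int) (g : List Int) (k : Int) : List Int :=
  (PySem.List.pyRange 0 (k + 1) 1).foldl (bInnerStep t q k) g

def get_max_golds_alt (horses_tian : List Int) (horses_qi : List Int) : Int :=
  let t := PySem.List.sorted horses_tian (fun x => x) true
  let q := PySem.List.sorted horses_qi (fun x => x) true
  let n : Int := PySem.List.len t
  let g0 : List Int := List.replicate (t.length + 1) 0
  let g := (PySem.List.pyRange (n - 1) (-1) (-1)).foldl (bLevel t q) g0
  PySem.List.pyGetD g 0 0

-- ===== PRECONDITION & SPEC =====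
-- Pre_: exactly where Python A returns normally; on an empty horses_tian, or when
-- horses_qi is shorter than horses_tian, A raises IndexError.
def Pre_get_max_golds (horses_tian : List Int) (horses_qi : List Int) : Prop :=
  horses_tian ≠ [] ∧ horses_tian.length ≤ horses_qi.length
instance (horses_tian : List Int) (horses_qi : List Int) : Decidable (Pre_get_max_golds horses_tian horses_qi) := by unfold Pre_get_max_golds; infer_instance
def pvWitness_get_max_golds : List Int × List Int := ([3, 1, 2], [2, 2, 4])

def Spec_get_max_golds (horses_tian : List Int) (horses_qi : List Int) (out : Int) : Prop := out = get_max_golds_alt horses_tian horses_qi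
instance (horses_tian : List Int) (horses_qi : List Int) (out : Int) : Decidable (Spec_get_max_golds horses_tian horses_qi out) := by unfold Spec_get_max_golds; infer_instance

-- ===== CLAIM (what is proved, stated in full; the proofs are below) =====
def Claim_equal_get_max_golds : Prop := ∀ (horses_tian : List Int) (horses_qi : List Int), Dom_get_max_golds horses_tian horses_qi → Pre_get_max_golds horses_tian horses_qi → Spec_get_max_golds horses_tian horses_qi (get_max_golds horses_tian horses_qi)

-- ===== LEMMAS AND PROOFS =====

-- Forward DP value: tjH t q k s = A's table entry max_golds[k-1][s] (best net gold after the
-- first k races using s slow horses), stated directly on the sorted lists t, q.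
def tjH (t : List Int) (q : List Int) : Nat → Nat → Int
  | 0, _ => 0
  | (k+1), s =>
    if s = 0 then tjH t q k 0 + get_gold_by_one_race (t.getD k 0) (q.getD k 0)
    else if s = k+1 then tjH t q k k + get_gold_by_one_race (t.getD (t.length - s) 0) (q.getD k 0)
    else max (tjH t q k s + get_gold_by_one_race (t.getD (k - s) 0) (q.getD k 0))
             (tjH t q k (s-1) + get_gold_by_one_race (t.getD (t.length - s) 0) (q.getD k 0))

-- Backward DP value: tjG t q k s = best net gold of the remaining races k..n-1 when k races are
-- done with s of them slow.
def tjG (t : List Int) (q : List Int) (k s : Nat) : Int :=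
  if h : k < t.length then
    max (get_gold_by_one_race (t.getD (k - s) 0) (q.getD k 0) + tjG t q (k+1) s)
        (get_gold_by_one_race (t.getD (t.length - 1 - s) 0) (q.getD k 0) + tjG t q (k+1) (s+1))
  else 0
termination_by t.length - k

-- max of f 0, …, f k
def natMaxF : Nat → (Nat → Int) → Int
  | 0, f => f 0
  | (k+1), f => max (natMaxF k f) (f (k+1))

theorem le_natMaxF (k : Nat) (f : Nat → Int) (s : Nat) (hs : s ≤ k) : f s ≤ natMaxF k f := by
  induction k with
  | zero => simp_all [natMaxF]
  | succ k ih =>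
    rcases Nat.lt_or_ge s (k+1) with h | h
    · exact le_trans (ih (by omega)) (le_max_left _ _)
    · have : s = k + 1 := by omega
      subst this; exact le_max_right _ _

theorem natMaxF_le (k : Nat) (f : Nat → Int) (c : Int) (h : ∀ s, s ≤ k → f s ≤ c) : natMaxF k f ≤ c := by
  induction k with
  | zero => exact h 0 (by omega)
  | succ k ih =>
    exact max_le (ih (fun s hs => h s (by omega))) (h (k+1) (by omega))

theorem natMaxF_congr (k : Nat) (f g : Nat → Int) (h : ∀ s, s ≤ k → f s = g s) : natMaxF k f = natMaxF k g := by
  induction k with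
  | zero => simp [natMaxF, h 0 (by omega)]
  | succ k ih =>
    simp only [natMaxF]
    rw [ih (fun s hs => h s (by omega)), h (k+1) (by omega)]

theorem natMaxF_eq_foldl (k : Nat) (f : Nat → Int) :
    natMaxF k f = ((List.range k).map (fun j => f (j+1))).foldl max (f 0) := by
  induction k with
  | zero => simp [natMaxF]
  | succ k ih => simp [natMaxF, List.range_succ, ih]

theorem tjG_lt (t q : List Int) (k s : Nat) (h : k < t.length) :
    tjG t q k s = max (get_gold_by_one_race (t.getD (k - s) 0) (q.getD k 0) + tjG t q (k+1) s)
        (get_gold_by_one_race (t.getD (t.length - 1 - s) 0) (q.getD k 0) + tjG t q (k+1) (s+1)) := by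
  rw [tjG]; simp [h]

theorem tjG_ge (t q : List Int) (k s : Nat) (h : ¬ k < t.length) : tjG t q k s = 0 := by
  rw [tjG]; simp [h]

theorem tjH_succ_fast (t q : List Int) (j s : Nat) (hs : s ≤ j) :
    tjH t q j s + get_gold_by_one_race (t.getD (j - s) 0) (q.getD j 0) ≤ tjH t q (j+1) s := by
  rcases Nat.eq_zero_or_pos s with h0 | h0
  · subst h0; simp [tjH]
  · have h1 : ¬ (s = 0) := by omega
    rcases Nat.lt_or_ge s (j+1) with h2 | h2
    · have h3 : ¬ (s = j+1) := by omega
      simp only [tjH, if_neg h1, if_neg h3]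
      exact le_max_left _ _
    · omega

theorem tjH_succ_slow (t q : List Int) (j s : Nat) (hs : s ≤ j) :
    tjH t q j s + get_gold_by_one_race (t.getD (t.length - 1 - s) 0) (q.getD j 0) ≤ tjH t q (j+1) (s+1) := by
  have hidx : t.length - 1 - s = t.length - (s+1) := by omega
  rcases Nat.lt_or_ge s j with h2 | h2
  · have h1 : ¬ (s + 1 = 0) := by omega
    have h3 : ¬ (s + 1 = j+1) := by omega
    simp only [tjH, if_neg h1, if_neg h3, Nat.add_sub_cancel, hidx]
    exact le_max_right _ _
  · have hsj : s = j := by omega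
    subst hsj
    simp only [tjH, if_neg (by omega : ¬ (s+1 = 0)), hidx]
    simp

-- One level of the max-plus interchange.
theorem tj_step (t : List Int) (q : List Int) (j : Nat) (hjn : j < t.length) :
    natMaxF (j+1) (fun s => tjH t q (j+1) s + tjG t q (j+1) s)
      = natMaxF j (fun s => tjH t q j s + tjG t q j s) := by
  apply le_antisymm
  · apply natMaxF_le
    intro s hs
    rcases Nat.eq_zero_or_pos s with h0 | h0
    · subst h0
      have hH : tjH t q (j+1) 0 = tjH t q j 0 + get_gold_by_one_race (t.getD j 0) (q.getD j 0) := by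
        simp [tjH]
      have hG : get_gold_by_one_race (t.getD j 0) (q.getD j 0) + tjG t q (j+1) 0 ≤ tjG t q j 0 := by
        rw [tjG_lt t q j 0 hjn]
        simpa using le_max_left _ _
      calc tjH t q (j+1) 0 + tjG t q (j+1) 0
          = tjH t q j 0 + (get_gold_by_one_race (t.getD j 0) (q.getD j 0) + tjG t q (j+1) 0) := by
            rw [hH]; ring
        _ ≤ tjH t q j 0 + tjG t q j 0 := by linarith [hG]
        _ ≤ natMaxF j (fun s => tjH t q j s + tjG t q j s) := le_natMaxF j _ 0 (by omega)
    · rcases Nat.lt_or_ge s (j+1) with hlt | hge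
      · -- 0 < s ≤ j : tjH (j+1) s is a max of two options
        have h1 : ¬ (s = 0) := by omega
        have h3 : ¬ (s = j+1) := by omega
        have hH : tjH t q (j+1) s =
            max (tjH t q j s + get_gold_by_one_race (t.getD (j - s) 0) (q.getD j 0))
                (tjH t q j (s-1) + get_gold_by_one_race (t.getD (t.length - s) 0) (q.getD j 0)) := by
          simp only [tjH, if_neg h1, if_neg h3]
        have hGf : get_gold_by_one_race (t.getD (j - s) 0) (q.getD j 0) + tjG t q (j+1) s ≤ tjG t q j s := by
          rw [tjG_lt t q j s hjn]; exact le_max_left _ _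
        have hGs : get_gold_by_one_race (t.getD (t.length - s) 0) (q.getD j 0) + tjG t q (j+1) s ≤ tjG t q j (s-1) := by
          rw [tjG_lt t q j (s-1) hjn]
          have e1 : t.length - 1 - (s-1) = t.length - s := by omega
          have e2 : s - 1 + 1 = s := by omega
          rw [e2, e1]
          exact le_max_right _ _
        rw [hH, ← max_add_add_right]
        apply max_le
        · calc tjH t q j s + get_gold_by_one_race (t.getD (j - s) 0) (q.getD j 0) + tjG t q (j+1) s
              = tjH t q j s + (get_gold_by_one_race (t.getD (j - s) 0) (q.getD j 0) + tjG t q (j+1) s) := by ring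
            _ ≤ tjH t q j s + tjG t q j s := by linarith [hGf]
            _ ≤ _ := le_natMaxF j _ s (by omega)
        · calc tjH t q j (s-1) + get_gold_by_one_race (t.getD (t.length - s) 0) (q.getD j 0) + tjG t q (j+1) s
              = tjH t q j (s-1) + (get_gold_by_one_race (t.getD (t.length - s) 0) (q.getD j 0) + tjG t q (j+1) s) := by ring
            _ ≤ tjH t q j (s-1) + tjG t q j (s-1) := by linarith [hGs]
            _ ≤ _ := le_natMaxF j _ (s-1) (by omega)
      · -- s = j+1
        have hsj : s = j + 1 := by omega
        subst hsj
        have hH : tjH t q (j+1) (j+1) = tjH t q j j + get_gold_by_one_race (t.getD (t.length - (j+1)) 0) (q.getD j 0) := by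
          simp only [tjH, if_neg (by omega : ¬ (j+1 = 0))]
          simp
        have hG : get_gold_by_one_race (t.getD (t.length - (j+1)) 0) (q.getD j 0) + tjG t q (j+1) (j+1) ≤ tjG t q j j := by
          rw [tjG_lt t q j j hjn]
          have e1 : t.length - 1 - j = t.length - (j+1) := by omega
          rw [e1]
          exact le_max_right _ _
        calc tjH t q (j+1) (j+1) + tjG t q (j+1) (j+1)
            = tjH t q j j + (get_gold_by_one_race (t.getD (t.length - (j+1)) 0) (q.getD j 0) + tjG t q (j+1) (j+1)) := by
              rw [hH]; ring
          _ ≤ tjH t q j j + tjG t q j j := by linarith [hG]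
          _ ≤ _ := le_natMaxF j _ j (by omega)
  · apply natMaxF_le
    intro s hs
    have hsplit : tjH t q j s + tjG t q j s =
        max (tjH t q j s + (get_gold_by_one_race (t.getD (j - s) 0) (q.getD j 0) + tjG t q (j+1) s))
            (tjH t q j s + (get_gold_by_one_race (t.getD (t.length - 1 - s) 0) (q.getD j 0) + tjG t q (j+1) (s+1))) := by
      rw [tjG_lt t q j s hjn, ← max_add_add_left]
    rw [hsplit]
    apply max_le
    · calc tjH t q j s + (get_gold_by_one_race (t.getD (j - s) 0) (q.getD j 0) + tjG t q (j+1) s)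
          = (tjH t q j s + get_gold_by_one_race (t.getD (j - s) 0) (q.getD j 0)) + tjG t q (j+1) s := by ring
        _ ≤ tjH t q (j+1) s + tjG t q (j+1) s := by linarith [tjH_succ_fast t q j s hs]
        _ ≤ _ := le_natMaxF (j+1) _ s (by omega)
    · calc tjH t q j s + (get_gold_by_one_race (t.getD (t.length - 1 - s) 0) (q.getD j 0) + tjG t q (j+1) (s+1))
          = (tjH t q j s + get_gold_by_one_race (t.getD (t.length - 1 - s) 0) (q.getD j 0)) + tjG t q (j+1) (s+1) := by ring
        _ ≤ tjH t q (j+1) (s+1) + tjG t q (j+1) (s+1) := by linarith [tjH_succ_slow t q j s hs]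
        _ ≤ _ := le_natMaxF (j+1) _ (s+1) (by omega)

-- The max-plus interchange: the quantity max_{s ≤ k} (tjH k s + tjG k s) does not depend on k.
theorem tj_bridge (t q : List Int) (j : Nat) (hj : j ≤ t.length) :
    natMaxF j (fun s => tjH t q j s + tjG t q j s) = tjG t q 0 0 := by
  induction j with
  | zero => simp [natMaxF, tjH]
  | succ j ih =>
    rw [tj_step t q j (by omega)]
    exact ih (by omega)

def rowH (t q : List Int) (r : Nat) : List Int := (List.range (r+1)).map (fun s => tjH t q r s)

def gArr (t q : List Int) (k : Nat) : List Int :=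
  (List.range (t.length + 1)).map (fun f => if f ≤ k then tjG t q k (k - f) else tjG t q f 0)

-- inner-loop partial state at level k, first f' entries updated
def gMid (t q : List Int) (k f' : Nat) : List Int :=
  (List.range (t.length + 1)).map (fun f =>
    if f < f' then tjG t q k (k - f)
    else if f ≤ k + 1 then tjG t q (k+1) (k+1-f) else tjG t q f 0)

theorem gMid_zero (t q : List Int) (k : Nat) : gMid t q k 0 = gArr t q (k+1) := by
  unfold gMid gArr
  apply List.map_congr_left
  intro f _
  simp

theorem gMid_last (t q : List Int) (k : Nat) : gMid t q k (k+1) = gArr t q k := by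
  unfold gMid gArr
  apply List.map_congr_left
  intro f _
  by_cases h1 : f < k + 1
  · simp [h1, Nat.lt_succ_iff.mp h1]
  · have h2 : ¬ f ≤ k := by omega
    by_cases h3 : f ≤ k + 1
    · have hf : f = k + 1 := by omega
      subst hf
      simp
    · simp [h1, h2, h3]

theorem gMid_set (t q : List Int) (k f' : Nat) (hf : f' ≤ k) :
    (gMid t q k f').set f' (tjG t q k (k - f')) = gMid t q k (f'+1) := by
  apply List.ext_getElem
  · simp [gMid]
  · intro i h1 h2
    unfold gMid at *
    simp only [List.length_set, List.length_map, List.length_range] at h1 h2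
    rw [List.getElem_set]
    simp only [List.getElem_map, List.getElem_range]
    by_cases he : f' = i
    · subst he
      simp
    · by_cases hlt : i < f'
      · simp [he, hlt, show i < f' + 1 by omega]
      · simp [he, hlt, show ¬ i < f' + 1 by omega]

theorem bInner_step (t q : List Int) (k f' : Nat) (hk : k < t.length) (hf : f' ≤ k) :
    bInnerStep t q (k : Int) (gMid t q k f') (f' : Int) = gMid t q k (f'+1) := by
  unfold bInnerStep
  have e1 : ((t.length : Int)) - 1 - ((k : Int) - (f' : Int)) = ((t.length - 1 - (k - f') : Nat) : Int) := by
    omega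
  have e2 : ((f' : Int)) + 1 = (((f' + 1 : Nat)) : Int) := by push_cast; ring
  simp only [PySem.List.len_eq, e1, e2, PySem.List.pyGetD_natCast, PySem.List.pySetD_natCast]
  have hg1 : (gMid t q k f').getD (f' + 1) 0 = tjG t q (k+1) (k - f') := by
    unfold gMid
    rw [PySem.List.getD_map_range _ _ _ _ (by omega)]
    have : k + 1 - (f' + 1) = k - f' := by omega
    simp [show ¬ f' + 1 < f' by omega, show f' + 1 ≤ k + 1 by omega, this]
  have hg2 : (gMid t q k f').getD f' 0 = tjG t q (k+1) ((k - f') + 1) := by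
    unfold gMid
    rw [PySem.List.getD_map_range _ _ _ _ (by omega)]
    have : k + 1 - f' = (k - f') + 1 := by omega
    simp [show ¬ f' < f' by omega, show f' ≤ k + 1 by omega, this]
  rw [hg1, hg2]
  have hv : max ((if t.getD f' 0 > q.getD k 0 then (1:Int) else if t.getD f' 0 < q.getD k 0 then -1 else 0)
        + tjG t q (k+1) (k - f'))
      ((if t.getD (t.length - 1 - (k - f')) 0 > q.getD k 0 then (1:Int) else if t.getD (t.length - 1 - (k - f')) 0 < q.getD k 0 then -1 else 0)
        + tjG t q (k+1) ((k - f') + 1)) = tjG t q k (k - f') := by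
    rw [tjG_lt t q k (k - f') hk]
    have : k - (k - f') = f' := by omega
    simp [get_gold_by_one_race, this]
  rw [hv]
  exact gMid_set t q k f' hf

theorem bLevel_aux (t q : List Int) (k : Nat) (hk : k < t.length) :
    ∀ (m a : Nat), a + m = k + 1 →
      (PySem.List.pyRange (a : Int) ((k : Int) + 1) 1).foldl (bInnerStep t q (k : Int)) (gMid t q k a)
        = gMid t q k (k+1) := by
  intro m
  induction m with
  | zero =>
    intro a ha
    have hak : a = k + 1 := by omega
    subst hak
    rw [PySem.List.pyRange_one_eq_nil (by push_cast; omega)]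
    simp
  | succ m ih =>
    intro a ha
    have hak : a ≤ k := by omega
    rw [PySem.List.pyRange_one_cons (by push_cast; omega)]
    rw [List.foldl_cons, bInner_step t q k a hk hak]
    have e : (a : Int) + 1 = ((a + 1 : Nat) : Int) := by push_cast; ring
    rw [e]
    exact ih (a+1) (by omega)

theorem bLevel_eq (t q : List Int) (k : Nat) (hk : k < t.length) :
    bLevel t q (gArr t q (k+1)) (k : Int) = gArr t q k := by
  unfold bLevel
  rw [← gMid_zero, ← gMid_last t q k]
  have e : (0 : Int) = ((0 : Nat) : Int) := by norm_num
  rw [e]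
  exact bLevel_aux t q k hk (k+1) 0 (by omega)

theorem bOuter (t q : List Int) :
    ∀ (j : Nat), j ≤ t.length →
      (PySem.List.pyRange ((j : Int) - 1) (-1) (-1)).foldl (bLevel t q) (gArr t q j) = gArr t q 0 := by
  intro j
  induction j with
  | zero =>
    intro _
    rw [show ((0 : Nat) : Int) - 1 = -1 by norm_num]
    rw [PySem.List.pyRange_neg_one_eq_nil (by norm_num)]
    simp
  | succ j ih =>
    intro hj
    rw [show (((j+1 : Nat)) : Int) - 1 = (j : Int) by push_cast; ring]
    rw [PySem.List.pyRange_neg_one_cons (by omega)]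
    rw [List.foldl_cons, bLevel_eq t q j (by omega)]
    exact ih (by omega)

theorem gArr_top (t q : List Int) : gArr t q t.length = List.replicate (t.length + 1) 0 := by
  rw [List.eq_replicate_iff]
  constructor
  · simp [gArr]
  · intro b hb
    unfold gArr at hb
    obtain ⟨f, _, hfb⟩ := List.mem_map.mp hb
    by_cases hfn : f ≤ t.length
    · rw [← hfb]
      simp [hfn, tjG_ge t q t.length _ (by omega)]
    · rw [← hfb]
      simp [hfn, tjG_ge t q f _ (by omega)]

theorem alt_eq (horses_tian horses_qi : List Int) :
    get_max_golds_alt horses_tian horses_qi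
      = tjG (PySem.List.sorted horses_tian (fun x => x) true) (PySem.List.sorted horses_qi (fun x => x) true) 0 0 := by
  unfold get_max_golds_alt
  set t := PySem.List.sorted horses_tian (fun x => x) true with ht
  set q := PySem.List.sorted horses_qi (fun x => x) true with hq
  simp only [PySem.List.len_eq]
  rw [← gArr_top t q]
  rw [bOuter t q t.length (le_refl _)]
  rw [PySem.List.pyGetD_zero]
  unfold gArr
  rw [PySem.List.getD_map_range _ _ _ _ (by omega)]
  simp

theorem rowH_getD (t q : List Int) (r s : Nat) (hs : s ≤ r) : (rowH t q r).getD s 0 = tjH t q r s := by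
  unfold rowH
  rw [PySem.List.getD_map_range _ _ _ _ (by omega)]

theorem rowH_split (t q : List Int) (r : Nat) :
    rowH t q (r+1)
      = [tjH t q (r+1) 0] ++ (List.range r).map (fun i => tjH t q (r+1) (i+1)) ++ [tjH t q (r+1) (r+1)] := by
  unfold rowH
  rw [List.range_succ, List.map_append, List.range_succ_eq_map, List.map_cons, List.map_map]
  simp [Function.comp_def, Nat.succ_eq_add_one]

theorem map_rowH_last (t q : List Int) (r : Nat) (hr : 1 ≤ r) :
    PySem.List.pyGetD ((List.range r).map (fun i => rowH t q (i+1))) (-1) [] = rowH t q r := by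
  have hne : (List.range r).map (fun i => rowH t q (i+1)) ≠ [] := by
    simp [List.map_eq_nil_iff, List.range_eq_nil]
    omega
  rw [PySem.List.pyGetD_neg_one _ _ hne]
  rw [List.getLast_eq_getElem]
  simp only [List.length_map, List.length_range]
  rw [List.getElem_map, List.getElem_range]
  congr 1
  omega

theorem aRow_eq (t q : List Int) (r : Nat) (h1 : 1 ≤ r) (hr : r + 1 ≤ t.length)
    (tbl : List (List Int)) (htbl : PySem.List.pyGetD tbl (-1) [] = rowH t q r) :
    aRow t q tbl ((r : Int) + 1) = tbl ++ [rowH t q (r+1)] := by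
  unfold aRow
  have er : (r : Int) + 1 - 1 = (r : Int) := by ring
  simp only [htbl, er]
  -- first element
  have h0 : PySem.List.pyGetD (rowH t q r) 0 0 +
      get_gold_by_one_race (PySem.List.pyGetD t (r : Int) 0) (PySem.List.pyGetD q (r : Int) 0)
        = tjH t q (r+1) 0 := by
    rw [PySem.List.pyGetD_zero, PySem.List.pyGetD_natCast, PySem.List.pyGetD_natCast]
    have : (rowH t q r).getD 0 0 = tjH t q r 0 := rowH_getD t q r 0 (by omega)
    rw [show (rowH t q r).getD 0 0 = tjH t q r 0 from by
          have := rowH_getD t q r 0 (by omega); simpa [List.getD] using this]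
    simp [tjH]
  -- middle elements
  rw [PySem.List.foldl_append_singleton_eq_map, PySem.List.pyRange_one]
  rw [show ((r : Int) + 1 - 1).toNat = r by omega]
  rw [List.map_map]
  have hmid : ∀ i ∈ List.range r,
      ((fun slow_horse_num => max
        (PySem.List.pyGetD (rowH t q r) slow_horse_num 0 +
           get_gold_by_one_race (PySem.List.pyGetD t ((r : Int) + 1 - slow_horse_num - 1) 0) (PySem.List.pyGetD q (r : Int) 0))
        (PySem.List.pyGetD (rowH t q r) (slow_horse_num - 1) 0 +
           get_gold_by_one_race (PySem.List.pyGetD t (-slow_horse_num) 0) (PySem.List.pyGetD q (r : Int) 0))) ∘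
        (fun (k : Nat) => (1 : Int) + (k : Int))) i
      = tjH t q (r+1) (i+1) := by
    intro i hi
    have hir : i < r := List.mem_range.mp hi
    simp only [Function.comp_apply]
    have e1 : (1 : Int) + (i : Int) = ((i+1 : Nat) : Int) := by push_cast; ring
    have e2 : (1 : Int) + (i : Int) - 1 = ((i : Nat) : Int) := by push_cast; ring
    have e3 : (r : Int) + 1 - ((1 : Int) + (i : Int)) - 1 = ((r - (i+1) : Nat) : Int) := by omega
    rw [e3]
    rw [show -((1:Int) + (i : Int)) = -(((i+1 : Nat)) : Int) by push_cast; ring]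
    rw [e2, e1]
    rw [PySem.List.pyGetD_natCast, PySem.List.pyGetD_natCast, PySem.List.pyGetD_natCast,
        PySem.List.pyGetD_natCast]
    rw [PySem.List.pyGetD_neg_natCast t (i+1) 0 (by omega) (by omega)]
    rw [rowH_getD t q r (i+1) (by omega), rowH_getD t q r i (by omega)]
    have hget : t[t.length - (i+1)] = t.getD (t.length - (i+1)) 0 := by
      rw [List.getD_eq_getElem _ _ (by omega)]
    rw [hget]
    simp only [tjH, if_neg (show ¬ (i+1 = 0) by omega), if_neg (show ¬ (i+1 = r+1) by omega), Nat.add_sub_cancel]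
  rw [List.map_congr_left hmid]
  -- last element
  have hlast : PySem.List.pyGetD (rowH t q r) ((r : Int)) 0 +
      get_gold_by_one_race (PySem.List.pyGetD t (-((r : Int) + 1)) 0) (PySem.List.pyGetD q (r : Int) 0)
        = tjH t q (r+1) (r+1) := by
    rw [PySem.List.pyGetD_natCast, PySem.List.pyGetD_natCast]
    rw [show -((r : Int) + 1) = -(((r+1 : Nat)) : Int) by push_cast; ring]
    rw [PySem.List.pyGetD_neg_natCast t (r+1) 0 (by omega) (by omega)]
    rw [rowH_getD t q r r (by omega)]
    have hget : t[t.length - (r+1)] = t.getD (t.length - (r+1)) 0 := by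
      rw [List.getD_eq_getElem _ _ (by omega)]
    rw [hget]
    simp only [tjH, if_neg (show ¬ (r+1 = 0) by omega)]
    simp
  rw [h0, hlast]
  rw [rowH_split t q r]

theorem aOuter (t q : List Int) :
    ∀ (r : Nat), 1 ≤ r → r ≤ t.length →
      (PySem.List.pyRange 2 ((r : Int) + 1) 1).foldl (aRow t q) [rowH t q 1]
        = (List.range r).map (fun i => rowH t q (i+1)) := by
  intro r
  induction r with
  | zero => intro h; omega
  | succ r ih =>
    intro _ hr
    rcases Nat.eq_zero_or_pos r with h0 | h0
    · subst h0
      rw [PySem.List.pyRange_one_eq_nil (by norm_num)]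
      simp [List.range_succ]
    · rw [show (((r+1 : Nat)) : Int) + 1 = ((r : Int) + 1) + 1 by push_cast; ring]
      rw [PySem.List.pyRange_one_succ_right (by omega)]
      rw [List.foldl_append, List.foldl_cons, List.foldl_nil]
      rw [ih h0 (by omega)]
      rw [aRow_eq t q r h0 (by omega) _ (map_rowH_last t q r h0)]
      rw [List.range_succ]
      simp

theorem a_eq (horses_tian horses_qi : List Int) (hne : horses_tian ≠ []) :
    get_max_golds horses_tian horses_qi
      = natMaxF (PySem.List.sorted horses_tian (fun x => x) true).length
          (fun s => tjH (PySem.List.sorted horses_tian (fun x => x) true) (PySem.List.sorted horses_qi (fun x => x) true) (PySem.List.sorted horses_tian (fun x => x) true).length s) := by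
  unfold get_max_golds
  set t := PySem.List.sorted horses_tian (fun x => x) true with ht
  set q := PySem.List.sorted horses_qi (fun x => x) true with hq
  have hn : 1 ≤ t.length := by
    rw [ht, PySem.List.length_sorted]
    exact List.length_pos_of_ne_nil hne
  have hrow0 : [get_gold_by_one_race (PySem.List.pyGetD t 0 0) (PySem.List.pyGetD q 0 0),
      get_gold_by_one_race (PySem.List.pyGetD t (-1) 0) (PySem.List.pyGetD q 0 0)] = rowH t q 1 := by
    rw [PySem.List.pyGetD_zero, PySem.List.pyGetD_zero]
    rw [show (-1 : Int) = -(((1 : Nat)) : Int) by norm_num]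
    rw [PySem.List.pyGetD_neg_natCast t 1 0 (by omega) (by omega)]
    have hget : t[t.length - 1] = t.getD (t.length - 1) 0 := by
      rw [List.getD_eq_getElem _ _ (by omega)]
    rw [hget]
    unfold rowH
    rw [show (1:Nat) + 1 = 2 from rfl, List.range_succ, List.range_succ, List.range_zero]
    simp [tjH]
  simp only [PySem.List.len_eq]
  rw [hrow0]
  rw [aOuter t q t.length hn (le_refl _)]
  rw [map_rowH_last t q t.length hn]
  have hsplit : rowH t q t.length
      = tjH t q t.length 0 :: (List.range t.length).map (fun j => tjH t q t.length (j+1)) := by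
    unfold rowH
    rw [List.range_succ_eq_map, List.map_cons, List.map_map]
    simp [Function.comp_def, Nat.succ_eq_add_one]
  rw [hsplit, PySem.List.max?_id_cons]
  rw [natMaxF_eq_foldl]
  simp

-- ===== VERDICT (by name: the statement is the Claim_ definition above) =====
theorem get_max_golds_spec : Claim_equal_get_max_golds := by
  intro horses_tian horses_qi _ hpre
  unfold Spec_get_max_golds
  have hne : horses_tian ≠ [] := hpre.1
  rw [a_eq horses_tian horses_qi hne, alt_eq horses_tian horses_qi]
  set t := PySem.List.sorted horses_tian (fun x => x) true with ht
  set q := PySem.List.sorted horses_qi (fun x => x) true with hq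
  rw [natMaxF_congr t.length (fun s => tjH t q t.length s)
        (fun s => tjH t q t.length s + tjG t q t.length s)
        (fun s _ => by simp [tjG_ge t q t.length s (by omega)])]
  exact tj_bridge t q t.length (le_refl _)
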